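-- pv_equiv track=rewrite | github.com/jacob-fenster/NGS_gRNA | test_data/pMSA_algorithm/scripts/hmmalign_cleanup.py | find_alifrom_alito
-- ===== SOURCE A (Python) =====
-- def find_alifrom_alito(seq):
--     alnlen = len(seq)
--     alifrom, alito = None, None #index of start of alignment and end of alignment. First index of alignment is zero
--     for c in range(alnlen): #iterate through alignment columns
--         if seq[c].isalpha(): #find first entry of residue
--             if alifrom is None:
--                 alifrom = c
--             alito = c #pulls the last alpha character in the list
--     return alifrom, alito
-- ===== SOURCE B (Python) =====
-- def find_alifrom_alito(seq):
--     first = next((i for i, ch in enumerate(seq) if ch.isalpha()), None)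
--     if first is None:
--         return None, None
--     back = next(j for j, ch in enumerate(reversed(seq)) if ch.isalpha())
--     return first, len(seq) - 1 - back
-- ===== Notes on version B (the rewrite author's own statement) =====
-- stated objective: simpler
-- what changed: Replaces the single stateful pass tracking both boundaries with two directional searches (first alpha forward via next(), last alpha via the reversed string), which also runs at C speed through generator-based next() instead of a per-character Python loop.
import Mathlib
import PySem

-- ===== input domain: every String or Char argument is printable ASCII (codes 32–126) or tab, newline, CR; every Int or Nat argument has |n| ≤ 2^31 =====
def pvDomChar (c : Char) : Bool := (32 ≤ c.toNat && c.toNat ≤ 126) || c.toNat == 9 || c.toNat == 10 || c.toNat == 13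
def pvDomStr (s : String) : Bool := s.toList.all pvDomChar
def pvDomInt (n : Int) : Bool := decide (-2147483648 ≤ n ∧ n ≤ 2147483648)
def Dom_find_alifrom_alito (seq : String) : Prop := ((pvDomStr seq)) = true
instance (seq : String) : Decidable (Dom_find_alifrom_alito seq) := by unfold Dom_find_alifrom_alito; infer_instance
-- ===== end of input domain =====

-- B replaces A's single stateful pass tracking both boundaries with two directional
-- searches (first alpha forward, last alpha via the reversed string): simpler decomposition.


-- ===== PORT A =====
-- one pass over the indexed characters, updating (alifrom, alito)
def find_alifrom_alito (seq : String) : Option Int × Option Int :=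
  (PySem.List.enumerate seq.toList 0).foldl
    (fun (st : Option Int × Option Int) p =>
      if PySem.Chars.isalpha p.2 then
        ((match st.1 with | none => some p.1 | some v => some v), some p.1)
      else st)
    (none, none)

-- ===== PORT B =====
-- forward search for the first alpha index; if found, backward search (via reverse) for the last
def find_alifrom_alito_alt (seq : String) : Option Int × Option Int :=
  let l := seq.toList
  match l.findIdx? PySem.Chars.isalpha with
  | none => (none, none)
  | some i =>
    match l.reverse.findIdx? PySem.Chars.isalpha with
    | none => (none, none)
    | some j => (some (i : Int), some ((l.length - 1 - j : Nat) : Int))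

-- ===== PRECONDITION & SPEC =====
def Spec_find_alifrom_alito (seq : String) (out : Option Int × Option Int) : Prop := out = find_alifrom_alito_alt seq
instance (seq : String) (out : Option Int × Option Int) : Decidable (Spec_find_alifrom_alito seq out) := by unfold Spec_find_alifrom_alito; infer_instance

-- ===== CLAIM (what is proved, stated in full; the proofs are below) =====
def Claim_equal_find_alifrom_alito : Prop := ∀ (seq : String), Dom_find_alifrom_alito seq → Spec_find_alifrom_alito seq (find_alifrom_alito seq)

-- ===== LEMMAS AND PROOFS =====

-- Characterisation of A's fold: the first component becomes the first alpha index
-- (offset by s) unless already set; the second becomes the last alpha index (via reverse).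
theorem findA_fold_char (xs : List Char) (s : Int) (a b : Option Int) :
    (PySem.List.enumerate xs s).foldl
      (fun (st : Option Int × Option Int) p =>
        if PySem.Chars.isalpha p.2 then
          ((match st.1 with | none => some p.1 | some v => some v), some p.1)
        else st)
      (a, b)
    = ((match a with
        | some v => some v
        | none => (xs.findIdx? PySem.Chars.isalpha).map (fun k : Nat => s + (k : Int))),
       (match xs.reverse.findIdx? PySem.Chars.isalpha with
        | none => b
        | some j => some (s + ((xs.length - 1 - j : Nat) : Int)))) := by
  induction xs generalizing s a b with
  | nil => simp [PySem.List.enumerate_nil]; cases a <;> simp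
  | cons x t ih =>
    rw [PySem.List.enumerate_cons]
    simp only [List.foldl_cons]
    by_cases hx : PySem.Chars.isalpha x
    · simp only [hx, if_pos, ih]
      have hrev : (x :: t).reverse = t.reverse ++ [x] := by simp
      rw [hrev, List.findIdx?_append]
      cases hrt : t.reverse.findIdx? PySem.Chars.isalpha with
      | none =>
        have hlen : t.reverse.length = t.length := List.length_reverse
        simp only [Option.none_or, List.findIdx?_cons, hx, if_pos,
          List.findIdx?_nil, Option.map_none, Option.map_some]
        have ht : t.findIdx? PySem.Chars.isalpha = none := by
          rw [List.findIdx?_eq_none_iff] at *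
          intro y hy; exact hrt y (by simpa using hy)
        cases a <;> simp [hlen]
      | some j =>
        have hj : j < t.length := by
          rcases List.findIdx?_eq_some_iff_getElem.mp hrt with ⟨h1, _, _⟩
          simpa using h1
        have harith : (s + 1) + ((t.length - 1 - j : Nat) : Int)
            = s + (((x :: t).length - 1 - j : Nat) : Int) := by
          simp only [List.length_cons]
          push_cast [Nat.sub_sub]
          omega
        cases a with
        | none =>
          simp only [List.findIdx?_cons, hx, if_pos]
          simp [harith]
        | some v => simp [harith]
    · simp only [hx, Bool.false_eq_true, if_neg, not_false_iff, ih]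
      have hrev : (x :: t).reverse = t.reverse ++ [x] := by simp
      rw [hrev, List.findIdx?_append]
      have hxl : ([x] : List Char).findIdx? PySem.Chars.isalpha = none := by
        simp [List.findIdx?_cons, hx]
      cases hrt : t.reverse.findIdx? PySem.Chars.isalpha with
      | none =>
        simp only [hxl, Option.none_or]
        cases a <;> simp [List.findIdx?_cons, hx] <;>
          (cases List.findIdx? PySem.Chars.isalpha t <;> simp <;> ring_nf)
      | some j =>
        have hj : j < t.length := by
          rcases List.findIdx?_eq_some_iff_getElem.mp hrt with ⟨h1, _, _⟩
          simpa using h1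
        have harith : (s + 1) + ((t.length - 1 - j : Nat) : Int)
            = s + (((x :: t).length - 1 - j : Nat) : Int) := by
          simp only [List.length_cons]
          push_cast [Nat.sub_sub]
          omega
        cases a with
        | some v => simp [Option.some_or, harith]
        | none =>
          simp only [Option.some_or, harith, List.findIdx?_cons, hx, Bool.false_eq_true,
            if_false, Prod.mk.injEq]
          refine ⟨?_, trivial⟩
          cases List.findIdx? PySem.Chars.isalpha t <;> simp <;> ring_nf

-- ===== VERDICT (by name: the statement is the Claim_ definition above) =====
theorem find_alifrom_alito_spec : Claim_equal_find_alifrom_alito := by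
  intro seq _
  unfold Spec_find_alifrom_alito find_alifrom_alito find_alifrom_alito_alt
  rw [findA_fold_char]
  cases hf : seq.toList.findIdx? PySem.Chars.isalpha with
  | none =>
    have hr : seq.toList.reverse.findIdx? PySem.Chars.isalpha = none := by
      rw [List.findIdx?_eq_none_iff] at *
      intro y hy; exact hf y (by simpa using hy)
    simp [hf, hr]
  | some i =>
    have hr : seq.toList.reverse.findIdx? PySem.Chars.isalpha ≠ none := by
      intro h
      rw [List.findIdx?_eq_none_iff] at h
      rcases List.findIdx?_eq_some_iff_getElem.mp hf with ⟨hi, hpi, _⟩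
      have hmem : seq.toList[i] ∈ seq.toList.reverse :=
        List.mem_reverse.mpr (List.getElem_mem hi)
      simpa [hpi] using h _ hmem
    cases hr2 : seq.toList.reverse.findIdx? PySem.Chars.isalpha with
    | none => exact absurd hr2 hr
    | some j => simp [hf, hr2]
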